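-- pv_equiv track=rewrite | github.com/Ivan073/LimbusReplace | replace.py | invert_map_with_warnings
-- ===== SOURCE A (Python) =====
-- def invert_map_with_warnings(ordered_status_names: list[tuple[str, str]]):
--     """Convert list of (id, name) pairs to dict name -> id. Ids with same name both stored, but only first used."""
--     name_to_ids: dict[str, list[str]] = {}
--
--     # TODO: Check logic / rename
--     for id_, name in ordered_status_names:
--         if name not in name_to_ids:
--             name_to_ids[name] = []
--         name_to_ids[name].append(id_)
--
--     name_to_id: dict[str, str] = {}
--     for name, ids in name_to_ids.items():
--         # This can potentially result in incorrect status icon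
--         name_to_id[name] = ids[0]
--     return name_to_id
-- ===== SOURCE B (Python) =====
-- def invert_map_with_warnings(ordered_status_names: list[tuple[str, str]]):
--     """Convert list of (id, name) pairs to dict name -> id (first id per name wins)."""
--     name_to_id: dict[str, str] = {}
--     for id_, name in ordered_status_names:
--         name_to_id.setdefault(name, id_)
--     return name_to_id
-- ===== Notes on version B (the rewrite author's own statement) =====
-- stated objective: simpler
-- what changed: B replaces A's two-phase approach (group all ids per name into a dict of lists, then a second loop extracting each list's first element) with a single pass that setdefaults name->id directly, never materializing the intermediate lists.
import Mathlib
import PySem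

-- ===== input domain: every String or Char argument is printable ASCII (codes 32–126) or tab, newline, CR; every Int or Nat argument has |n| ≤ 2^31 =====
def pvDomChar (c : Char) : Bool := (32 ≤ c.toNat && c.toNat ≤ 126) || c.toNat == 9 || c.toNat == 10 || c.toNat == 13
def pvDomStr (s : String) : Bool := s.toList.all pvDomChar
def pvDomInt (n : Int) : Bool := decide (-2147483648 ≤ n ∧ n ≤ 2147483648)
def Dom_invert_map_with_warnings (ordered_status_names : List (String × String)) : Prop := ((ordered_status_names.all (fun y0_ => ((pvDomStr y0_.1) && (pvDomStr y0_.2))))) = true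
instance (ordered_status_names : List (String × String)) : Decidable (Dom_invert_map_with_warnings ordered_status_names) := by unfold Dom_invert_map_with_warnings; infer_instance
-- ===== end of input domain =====

-- B replaces A's two-phase grouping (dict of id-lists, then a pass taking each list's head)
-- by one setdefault pass building name -> first id directly; objective: simpler.

-- ===== PORT A =====
def invert_map_with_warnings (ordered_status_names : List (String × String)) : List (String × String) :=
  let name_to_ids : PySem.Dict String (List String) :=
    ordered_status_names.foldl (fun d p =>
      let d' := if d.contains p.2 then d else d.insert p.2 ([] : List String)
      d'.modify p.2 [] (fun ids => ids ++ [p.1])) PySem.Dict.empty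
  let name_to_id : PySem.Dict String String :=
    name_to_ids.items.foldl (fun d p =>
      match p.2 with
      | [] => d            -- Python's ids[0] would raise here; unreachable (every stored list is nonempty)
      | x :: _ => d.insert p.1 x) PySem.Dict.empty
  name_to_id.items

-- ===== PORT B =====
def invert_map_with_warnings_alt (ordered_status_names : List (String × String)) : List (String × String) :=
  (ordered_status_names.foldl (fun d p => d.setdefault p.2 p.1)
    (PySem.Dict.empty : PySem.Dict String String)).items

-- ===== PRECONDITION & SPEC =====
def Spec_invert_map_with_warnings (ordered_status_names : List (String × String)) (out : List (String × String)) : Prop := out = invert_map_with_warnings_alt ordered_status_names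
instance (ordered_status_names : List (String × String)) (out : List (String × String)) : Decidable (Spec_invert_map_with_warnings ordered_status_names out) := by unfold Spec_invert_map_with_warnings; infer_instance

-- ===== CLAIM (what is proved, stated in full; the proofs are below) =====
def Claim_equal_invert_map_with_warnings : Prop := ∀ (ordered_status_names : List (String × String)), Dom_invert_map_with_warnings ordered_status_names → Spec_invert_map_with_warnings ordered_status_names (invert_map_with_warnings ordered_status_names)

-- ===== LEMMAS AND PROOFS =====

-- A's first-loop body equals a single modify (the membership guard is redundant).
theorem pvStepA_eq (d : PySem.Dict String (List String)) (p : String × String) :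
    (let d' := if d.contains p.2 then d else d.insert p.2 ([] : List String)
     d'.modify p.2 [] (fun ids => ids ++ [p.1]))
    = d.modify p.2 [] (fun ids => ids ++ [p.1]) := by
  by_cases h : d.contains p.2
  · simp [h]
  · simp only [Bool.not_eq_true] at h
    simp [h, PySem.Dict.modify, PySem.Dict.getD_insert_self,
      PySem.Dict.insert_insert_self, PySem.Dict.getD_of_not_contains d _ h]

-- Main invariant: running A's first loop from d1 and B's loop from d2, where
-- d2's items are exactly the (name, head-of-ids) projections of d1's items,
-- preserves that relation together with key-nodup and value-nonemptiness.
theorem pvInvariant (l : List (String × String))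
    (d1 : PySem.Dict String (List String)) (d2 : PySem.Dict String String)
    (hnd : d1.keys.Nodup)
    (hne : ∀ p ∈ d1.items, p.2 ≠ [])
    (hrel : d2.items = d1.items.map (fun p => (p.1, p.2.headI))) :
    (l.foldl (fun d p => d.modify p.2 [] (fun ids => ids ++ [p.1])) d1).keys.Nodup ∧
    (∀ p ∈ (l.foldl (fun d p => d.modify p.2 [] (fun ids => ids ++ [p.1])) d1).items, p.2 ≠ []) ∧
    (l.foldl (fun d p => d.modify p.2 [] (fun ids => ids ++ [p.1])) d1).items.map (fun p => (p.1, p.2.headI))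
      = (l.foldl (fun d p => d.setdefault p.2 p.1) d2).items := by
  induction l generalizing d1 d2 with
  | nil => exact ⟨hnd, hne, hrel.symm⟩
  | cons p t ih =>
    have hkeys : d2.keys = d1.keys := by
      simp [PySem.Dict.keys, hrel, List.map_map, Function.comp]
    by_cases hc : d1.contains p.2
    · -- name already present: A appends to the list, head unchanged; B's setdefault is a no-op
      have hc2 : d2.contains p.2 = true := by
        rw [PySem.Dict.contains_eq_decide_mem_keys, hkeys,
          ← PySem.Dict.contains_eq_decide_mem_keys]; exact hc
      simp only [List.foldl_cons, PySem.Dict.setdefault_of_contains d2 _ hc2]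
      apply ih
      · rw [PySem.Dict.modify, PySem.Dict.keys_insert_of_contains _ _ hc]; exact hnd
      · intro q hq
        rw [PySem.Dict.modify, PySem.Dict.items_insert_of_contains _ _ hc] at hq
        obtain ⟨r, hr, hrq⟩ := List.mem_map.mp hq
        by_cases hb : (r.1 == p.2) = true
        · simp only [hb, if_true] at hrq
          subst hrq; simp
        · simp only [hb] at hrq
          subst hrq; exact hne r hr
      · rw [hrel, PySem.Dict.modify, PySem.Dict.items_insert_of_contains _ _ hc,
          List.map_map]
        apply List.map_congr_left
        intro q hq
        by_cases hb : (q.1 == p.2) = true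
        · have hq2 : q.1 = p.2 := by simpa using hb
          have hmem : (p.2, q.2) ∈ d1.items := by rw [← hq2]; exact hq
          have hget : d1.getD p.2 [] = q.2 :=
            PySem.Dict.getD_of_mem_items d1 hmem hnd []
          have hqne : q.2 ≠ [] := hne q hq
          simp only [Function.comp, hb, if_true, hget]
          cases hv : q.2 with
          | nil => exact absurd hv hqne
          | cons a as => simp [← hq2]
        · simp [Function.comp, hb]
    · -- fresh name: both sides append a new entry at the end
      simp only [Bool.not_eq_true] at hc
      have hc2 : d2.contains p.2 = false := by
        rw [PySem.Dict.contains_eq_decide_mem_keys, hkeys,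
          ← PySem.Dict.contains_eq_decide_mem_keys]; exact hc
      simp only [List.foldl_cons, PySem.Dict.setdefault_of_not_contains d2 _ hc2]
      apply ih
      · rw [PySem.Dict.modify, PySem.Dict.keys_insert_of_not_contains _ _ hc]
        have hnm : p.2 ∉ d1.keys := by
          have := PySem.Dict.contains_eq_decide_mem_keys d1 p.2
          rw [hc] at this; simpa using this.symm
        simp only [List.nodup_append, List.nodup_singleton, true_and]
        refine ⟨hnd, ?_⟩
        intro a ha b hb
        simp only [List.mem_singleton] at hb
        exact fun h => hnm (hb ▸ h ▸ ha)
      · intro q hq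
        rw [PySem.Dict.modify, PySem.Dict.items_insert_of_not_contains _ _ hc] at hq
        rcases List.mem_append.mp hq with h | h
        · exact hne q h
        · simp only [List.mem_singleton] at h
          subst h
          simp [PySem.Dict.getD_of_not_contains d1 _ hc]
      · rw [PySem.Dict.modify, PySem.Dict.items_insert_of_not_contains _ _ hc,
          PySem.Dict.items_insert_of_not_contains _ _ hc2, List.map_append, hrel]
        simp [PySem.Dict.getD_of_not_contains d1 _ hc]

-- A's second loop over a nodup-keyed dict of nonempty lists returns the head projection.
theorem pvPhase2 (d : PySem.Dict String (List String))
    (hnd : d.keys.Nodup) (hne : ∀ p ∈ d.items, p.2 ≠ []) :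
    (d.items.foldl (fun d2 p =>
      match p.2 with
      | [] => d2
      | x :: _ => d2.insert p.1 x) (PySem.Dict.empty : PySem.Dict String String)).items
    = d.items.map (fun p => (p.1, p.2.headI)) := by
  have hcongr : d.items.foldl (fun d2 p =>
      match p.2 with
      | [] => d2
      | x :: _ => d2.insert p.1 x) (PySem.Dict.empty : PySem.Dict String String)
      = d.items.foldl (fun d2 p => d2.insert p.1 p.2.headI) PySem.Dict.empty := by
    apply PySem.List.foldl_congr_mem
    intro acc q hq
    cases hv : q.2 with
    | nil => exact absurd hv (hne q hq)
    | cons a as => simp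
  rw [hcongr,
    PySem.Dict.items_foldl_insert_fresh d.items (fun p => p.1) (fun p => p.2.headI)
      PySem.Dict.empty (fun a _ => PySem.Dict.contains_empty a.1) hnd]
  simp [PySem.Dict.empty]

-- ===== VERDICT (by name: the statement is the Claim_ definition above) =====
theorem invert_map_with_warnings_spec : Claim_equal_invert_map_with_warnings := by
  intro l _
  unfold Spec_invert_map_with_warnings invert_map_with_warnings invert_map_with_warnings_alt
  have hstep : (fun (d : PySem.Dict String (List String)) (p : String × String) =>
      let d' := if d.contains p.2 then d else d.insert p.2 ([] : List String)
      d'.modify p.2 [] (fun ids => ids ++ [p.1]))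
      = fun d p => d.modify p.2 [] (fun ids => ids ++ [p.1]) := by
    funext d p; exact pvStepA_eq d p
  simp only [hstep]
  obtain ⟨hnd, hne, hrel⟩ := pvInvariant l PySem.Dict.empty PySem.Dict.empty
    (by simp [PySem.Dict.keys, PySem.Dict.empty])
    (by simp [PySem.Dict.empty])
    (by simp [PySem.Dict.empty])
  rw [pvPhase2 _ hnd hne, hrel]
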